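-- pv_equiv track=rewrite | github.com/BlackChesire/PycharmProjects | Shimon_Labs/makeList.py | makeList1
-- ===== SOURCE A (Python) =====
-- def makeList1(n):
--      # Nested list naive
--     lst1 = []
--     for i in range(2, n+2):
--         lst2 = []
--         for j in range(1, i):
--             lst2.append(j)
--         lst1.append(lst2)
--     return lst1
-- ===== SOURCE B (Python) =====
-- def makeList1(n):
--     # Single pass: each row extends the previous row by one element.
--     cur = []
--     res = []
--     for i in range(2, n + 2):
--         cur = cur + [i - 1]   # fresh list, no aliasing
--         res.append(cur)
--     return res
-- ===== Notes on version B (the rewrite author's own statement) =====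
-- stated objective: faster
-- what changed: Replaces the nested loop (rebuilding each row [1..i-1] from scratch) with a single pass that extends a running row by one element per iteration and appends it.
import Mathlib
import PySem

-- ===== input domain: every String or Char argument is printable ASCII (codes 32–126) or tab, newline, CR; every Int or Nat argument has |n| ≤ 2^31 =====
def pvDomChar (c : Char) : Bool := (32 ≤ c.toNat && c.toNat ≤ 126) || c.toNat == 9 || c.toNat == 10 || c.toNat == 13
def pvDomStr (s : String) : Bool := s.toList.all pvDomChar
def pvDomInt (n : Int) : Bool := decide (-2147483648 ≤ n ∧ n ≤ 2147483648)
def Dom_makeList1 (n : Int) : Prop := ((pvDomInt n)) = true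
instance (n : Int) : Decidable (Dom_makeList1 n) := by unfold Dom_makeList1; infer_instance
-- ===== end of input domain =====

-- B replaces A's nested loop by a single pass extending a running row by one element per step (constant-factor objective).

-- ===== PORT A =====
def makeList1 (n : Int) : List (List Int) :=
  (PySem.List.pyRange 2 (n + 2) 1).foldl
    (fun lst1 i =>
      lst1 ++ [(PySem.List.pyRange 1 i 1).foldl (fun lst2 j => lst2 ++ [j]) []])
    []

-- ===== PORT B =====
def makeList1_alt (n : Int) : List (List Int) :=
  ((PySem.List.pyRange 2 (n + 2) 1).foldl
    (fun (st : List Int × List (List Int)) i =>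
      let cur := st.1 ++ [i - 1]
      (cur, st.2 ++ [cur]))
    ([], [])).2

-- ===== PRECONDITION & SPEC =====
def Spec_makeList1 (n : Int) (out : List (List Int)) : Prop := out = makeList1_alt n
instance (n : Int) (out : List (List Int)) : Decidable (Spec_makeList1 n out) := by unfold Spec_makeList1; infer_instance

-- ===== CLAIM (what is proved, stated in full; the proofs are below) =====
def Claim_equal_makeList1 : Prop := ∀ (n : Int), Dom_makeList1 n → Spec_makeList1 n (makeList1 n)

-- ===== LEMMAS AND PROOFS =====

theorem pv_foldl_app (xs : List Int) : ∀ acc : List Int,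
    xs.foldl (fun l x => l ++ [x]) acc = acc ++ xs := by
  induction xs with
  | nil => simp
  | cons x xs ih => intro acc; simp [List.foldl, ih]

theorem pv_main : ∀ (k : Nat) (a b : Int), (b - a).toNat = k → 2 ≤ a →
    ∀ res : List (List Int),
    (PySem.List.pyRange a b 1).foldl (fun l1 i => l1 ++ [PySem.List.pyRange 1 i 1]) res
    = ((PySem.List.pyRange a b 1).foldl
        (fun (st : List Int × List (List Int)) i =>
          let cur := st.1 ++ [i - 1]
          (cur, st.2 ++ [cur]))
        (PySem.List.pyRange 1 (a - 1) 1, res)).2 := by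
  intro k
  induction k with
  | zero =>
    intro a b hk ha res
    rw [PySem.List.pyRange_one_eq_nil (by omega)]
    rfl
  | succ k ih =>
    intro a b hk ha res
    rw [PySem.List.pyRange_one_cons (by omega)]
    simp only [List.foldl]
    have hcur : PySem.List.pyRange 1 (a - 1) 1 ++ [a - 1] = PySem.List.pyRange 1 a 1 := by
      have h := PySem.List.pyRange_one_succ_right (a := 1) (b := a - 1) (by omega)
      rw [show a - 1 + 1 = a by ring] at h
      exact h.symm
    rw [hcur]
    have h := ih (a + 1) b (by omega) (by omega) (res ++ [PySem.List.pyRange 1 a 1])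
    simpa [show a + 1 - 1 = a from by ring] using h

-- ===== VERDICT (by name: the statement is the Claim_ definition above) =====
theorem makeList1_spec : Claim_equal_makeList1 := by
  intro n _
  unfold Spec_makeList1 makeList1 makeList1_alt
  have hbody : (fun (l1 : List (List Int)) (i : Int) =>
      l1 ++ [(PySem.List.pyRange 1 i 1).foldl (fun lst2 j => lst2 ++ [j]) []])
      = fun l1 i => l1 ++ [PySem.List.pyRange 1 i 1] := by
    funext l1 i; rw [pv_foldl_app]; simp
  rw [hbody]
  have := pv_main ((n + 2) - 2).toNat 2 (n + 2) rfl (le_refl 2) []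
  simpa [PySem.List.pyRange_one_eq_nil] using this
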